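-- pv_equiv track=rewrite | github.com/aadyabubber/MACHINE-VISION-AND-PATTERN-RECOGNITION-PROJECTS | Multiresolution Blending/p4_new.py | max_pyramid_levels
-- ===== SOURCE A (Python) =====
-- def max_pyramid_levels(h: int, w: int, cap: int = 6) -> int:
--     """
--     Choose a safe number of pyramid levels for this image size.
--     """
--     levels = 0
--     mh, mw = h, w
--     while levels < cap and mh >= 4 and mw >= 4:
--         mh //= 2
--         mw //= 2
--         levels += 1
--     return max(levels, 1)
-- ===== SOURCE B (Python) =====
-- def max_pyramid_levels(h: int, w: int, cap: int = 6) -> int: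
--     """
--     Choose a safe number of pyramid levels for this image size.
--     """
--     m = min(h, w)
--     if m < 4 or cap < 1:
--         return 1
--     # for m >= 4, floor-halvings until < 4 is bit_length(m) - 2
--     return min(cap, m.bit_length() - 2)
-- ===== Notes on version B (the rewrite author's own statement) =====
-- stated objective: simpler
-- what changed: Replaces the halving loop with a closed form: levels = min(cap, bit_length(min(h,w)) - 2), with an explicit guard returning 1 when min(h,w) < 4 or cap < 1.
import Mathlib
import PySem

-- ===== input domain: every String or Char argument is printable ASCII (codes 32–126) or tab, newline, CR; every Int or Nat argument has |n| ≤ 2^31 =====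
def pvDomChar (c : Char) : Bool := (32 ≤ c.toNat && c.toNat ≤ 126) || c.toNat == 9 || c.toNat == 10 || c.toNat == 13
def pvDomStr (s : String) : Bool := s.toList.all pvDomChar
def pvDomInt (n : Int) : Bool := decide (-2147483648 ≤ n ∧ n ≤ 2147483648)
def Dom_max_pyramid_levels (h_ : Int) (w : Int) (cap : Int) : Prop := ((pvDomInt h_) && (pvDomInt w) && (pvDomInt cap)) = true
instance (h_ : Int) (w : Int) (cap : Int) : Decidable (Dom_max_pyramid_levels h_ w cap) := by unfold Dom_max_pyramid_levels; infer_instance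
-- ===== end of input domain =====

-- B replaces A's halving loop by the closed form min(cap, bit_length(min(h,w)) - 2); objective: simpler.

-- ===== PORT A =====
-- the while loop of A, with state (levels, mh, mw)
def pyLoopA (cap levels mh mw : Int) : Int :=
  if levels < cap ∧ 4 ≤ mh ∧ 4 ≤ mw then
    pyLoopA cap (levels + 1) (PySem.Int.floordiv mh 2) (PySem.Int.floordiv mw 2)
  else levels
termination_by (cap - levels).toNat
decreasing_by omega

def max_pyramid_levels (h_ : Int) (w : Int) (cap : Int) : Int :=
  max (pyLoopA cap 0 h_ w) 1

-- ===== PORT B =====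
def max_pyramid_levels_alt (h_ : Int) (w : Int) (cap : Int) : Int :=
  let m := min h_ w
  if m < 4 ∨ cap < 1 then 1
  else min cap ((PySem.Int.bitLength m : Int) - 2)

-- ===== PRECONDITION & SPEC =====
def Spec_max_pyramid_levels (h_ : Int) (w : Int) (cap : Int) (out : Int) : Prop := out = max_pyramid_levels_alt h_ w cap
instance (h_ : Int) (w : Int) (cap : Int) (out : Int) : Decidable (Spec_max_pyramid_levels h_ w cap out) := by unfold Spec_max_pyramid_levels; infer_instance

-- ===== CLAIM (what is proved, stated in full; the proofs are below) =====
def Claim_equal_max_pyramid_levels : Prop := ∀ (h_ : Int) (w : Int) (cap : Int), Dom_max_pyramid_levels h_ w cap → Spec_max_pyramid_levels h_ w cap (max_pyramid_levels h_ w cap)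

-- ===== LEMMAS AND PROOFS =====

lemma bitLength_ge_three {n : Int} (hn : 4 ≤ n) : 3 ≤ PySem.Int.bitLength n := by
  rw [PySem.Int.bitLength_of_pos (by omega : (0:Int) < n)]
  rw [PySem.Int.bitLength_of_pos (by rw [PySem.Int.floordiv_eq_ediv_of_pos (by norm_num)]; omega)]
  have h1 : (0:Int) < PySem.Int.floordiv (PySem.Int.floordiv n 2) 2 := by
    rw [PySem.Int.floordiv_eq_ediv_of_pos (by norm_num), PySem.Int.floordiv_eq_ediv_of_pos (by norm_num)]
    omega
  have := PySem.Int.bitLength_of_pos h1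
  omega

lemma bitLength_le_three {n : Int} (h4 : 4 ≤ n) (h7 : n ≤ 7) : PySem.Int.bitLength n ≤ 3 := by
  by_contra h
  have hle := PySem.Int.two_pow_bitLength_le n (by omega)
  have : 2 ^ 3 ≤ 2 ^ (PySem.Int.bitLength n - 1) := Nat.pow_le_pow_right (by norm_num) (by omega)
  omega

-- min commutes with //2
lemma floordiv_min (a b : Int) :
    PySem.Int.floordiv (min a b) 2 = min (PySem.Int.floordiv a 2) (PySem.Int.floordiv b 2) := by
  rw [PySem.Int.floordiv_eq_ediv_of_pos (by norm_num), PySem.Int.floordiv_eq_ediv_of_pos (by norm_num),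
    PySem.Int.floordiv_eq_ediv_of_pos (by norm_num)]
  rcases le_total a b with h | h
  · rw [min_eq_left h, min_eq_left (by omega)]
  · rw [min_eq_right h, min_eq_right (by omega)]

lemma bitLength_half {n : Int} (hn : 4 ≤ n) :
    PySem.Int.bitLength (PySem.Int.floordiv n 2) = PySem.Int.bitLength n - 1 := by
  rw [PySem.Int.bitLength_of_pos (by omega : (0:Int) < n)]; omega

lemma pyLoopA_eq (cap : Int) : ∀ levels mh mw : Int,
    pyLoopA cap levels mh mw =
      if levels < cap ∧ 4 ≤ mh ∧ 4 ≤ mw then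
        min cap (levels + ((PySem.Int.bitLength (min mh mw) : Int) - 2))
      else levels := by
  intro levels mh mw
  induction levels, mh, mw using pyLoopA.induct cap with
  | case2 levels mh mw hcond =>
    rw [pyLoopA, if_neg hcond, if_neg hcond]
  | case1 levels mh mw hcond ih =>
    rw [pyLoopA, if_pos hcond, ih, if_pos hcond]
    obtain ⟨hlc, hmh, hmw⟩ := hcond
    have hm : (4:Int) ≤ min mh mw := le_min hmh hmw
    have hB3 := bitLength_ge_three hm
    have hhalf := bitLength_half hm
    rw [← floordiv_min] at *
    set m := min mh mw with hmdef
    have hm2 : PySem.Int.floordiv m 2 * 2 ≤ m ∧ m < (PySem.Int.floordiv m 2 + 1) * 2 := by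
      rw [PySem.Int.floordiv_eq_ediv_of_pos (by norm_num)]; omega
    by_cases hc2 : levels + 1 < cap ∧ 4 ≤ PySem.Int.floordiv mh 2 ∧ 4 ≤ PySem.Int.floordiv mw 2
    · rw [if_pos hc2]
      have h4 : (4:Int) ≤ PySem.Int.floordiv m 2 := by
        rw [hmdef, floordiv_min]; exact le_min hc2.2.1 hc2.2.2
      have := bitLength_ge_three h4
      omega
    · rw [if_neg hc2]
      by_cases h4 : (4:Int) ≤ PySem.Int.floordiv m 2
      · -- then levels + 1 = cap
        have hsplit : ¬ (4 ≤ PySem.Int.floordiv mh 2 ∧ 4 ≤ PySem.Int.floordiv mw 2) → False := by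
          intro h
          have : (4:Int) ≤ min (PySem.Int.floordiv mh 2) (PySem.Int.floordiv mw 2) := by
            rw [← floordiv_min]; exact h4
          exact h ⟨le_trans this (min_le_left _ _), le_trans this (min_le_right _ _)⟩
        have hcap : ¬ (levels + 1 < cap) := by
          intro h; exact hc2 ⟨h, by by_contra hh; exact hsplit (by tauto)⟩
        have := bitLength_ge_three h4
        omega
      · -- m in [4,7], bitLength m = 3
        have hm7 : m ≤ 7 := by
          rw [PySem.Int.floordiv_eq_ediv_of_pos (by norm_num)] at h4; omega
        have := bitLength_le_three hm hm7
        omega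

-- ===== VERDICT (by name: the statement is the Claim_ definition above) =====
theorem max_pyramid_levels_spec : Claim_equal_max_pyramid_levels := by
  intro h_ w cap _
  unfold Spec_max_pyramid_levels max_pyramid_levels max_pyramid_levels_alt
  rw [pyLoopA_eq]
  by_cases hc : 0 < cap ∧ 4 ≤ h_ ∧ 4 ≤ w
  · have hm : (4:Int) ≤ min h_ w := le_min hc.2.1 hc.2.2
    have h3 := bitLength_ge_three hm
    simp only [hc, and_self, if_true, zero_add]
    rw [if_neg (by omega)]
    omega
  · have hcond : ¬ ((0:Int) < cap ∧ 4 ≤ h_ ∧ 4 ≤ w) := hc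
    rw [if_neg hcond, if_pos (by by_cases h1 : min h_ w < 4 <;> [exact Or.inl h1; exact Or.inr (by simp at h1 ⊢; omega)])]
    decide
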